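-- pv_equiv track=rewrite | github.com/aytekin-side/zeytinyaglarimiz | scripts/curate-brand-media.py | volume_bonus
-- ===== SOURCE A (Python) =====
-- def volume_bonus(name: str) -> int:
--     normalized = name.lower()
--     if any(token in normalized for token in ["500-ml", "500ml", "750ml", "750-ml", "1lt", "1-lt", "1000ml", "1000-ml"]):
--         return 7
--     if any(token in normalized for token in ["250ml", "250-ml", "250"]):
--         return 3
--     if any(token in normalized for token in ["2lt", "2-lt", "2000"]):
--         return 2
--     return 0
-- ===== SOURCE B (Python) =====
-- def _ml(s, i):
--     # does s[i:] begin with "ml" or "-ml"?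
--     return s[i:i+2] == "ml" or s[i:i+3] == "-ml"
--
--
-- def _lt(s, i):
--     # does s[i:] begin with "lt" or "-lt"?
--     return s[i:i+2] == "lt" or s[i:i+3] == "-lt"
--
--
-- def volume_bonus(name: str) -> int:
--     # Single left-to-right scan: at each position a hand-rolled character
--     # decision tree (a tiny trie walk keyed on the first digit) yields that
--     # position's bonus; the answer is the best bonus seen.  No token table,
--     # no substring search; "250ml"/"250-ml" are subsumed by the "250" branch.
--     s = name.lower()
--     best = 0
--     for i in range(len(s)):
--         c = s[i]
--         b = 0
--         if c == '5':
--             if s[i+1:i+3] == '00' and _ml(s, i + 3):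
--                 b = 7
--         elif c == '7':
--             if s[i+1:i+3] == '50' and _ml(s, i + 3):
--                 b = 7
--         elif c == '1':
--             if _lt(s, i + 1):
--                 b = 7
--             elif s[i+1:i+4] == '000' and _ml(s, i + 4):
--                 b = 7
--         elif c == '2':
--             if s[i+1:i+3] == '50':
--                 b = 3
--             elif _lt(s, i + 1):
--                 b = 2
--             elif s[i+1:i+4] == '000':
--                 b = 2
--         if b > best:
--             best = b
--     return best
-- ===== Notes on version B (the rewrite author's own statement) =====
-- stated objective: alternative
-- what changed: Replaced the three tiers of token-table substring searches by a single left-to-right scan that classifies each position of the lowercased name with a hand-rolled character decision tree (a trie walk keyed on the leading digit) and keeps the best bonus seen; the redundant 250ml/250-ml tokens collapse into the 250 branch.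
import Mathlib
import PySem

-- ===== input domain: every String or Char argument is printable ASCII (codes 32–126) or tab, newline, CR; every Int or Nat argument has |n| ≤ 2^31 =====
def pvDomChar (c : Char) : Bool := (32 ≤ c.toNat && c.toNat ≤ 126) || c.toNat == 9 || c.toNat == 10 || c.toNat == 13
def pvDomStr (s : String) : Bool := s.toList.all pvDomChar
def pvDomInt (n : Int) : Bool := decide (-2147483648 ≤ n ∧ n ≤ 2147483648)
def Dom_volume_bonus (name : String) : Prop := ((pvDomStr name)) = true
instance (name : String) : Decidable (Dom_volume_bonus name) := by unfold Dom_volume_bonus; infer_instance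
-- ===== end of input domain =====

-- B replaces A's token-table substring searches by one left-to-right scan classifying each
-- position with a character decision tree (alternative algorithm, O(1) work per position).

-- ===== PORT A =====
def volume_bonus (name : String) : Int :=
  let normalized := PySem.Str.lower name
  if (["500-ml", "500ml", "750ml", "750-ml", "1lt", "1-lt", "1000ml", "1000-ml"].any
      (fun token => PySem.Str.isIn token normalized)) then 7
  else if (["250ml", "250-ml", "250"].any (fun token => PySem.Str.isIn token normalized)) then 3
  else if (["2lt", "2-lt", "2000"].any (fun token => PySem.Str.isIn token normalized)) then 2
  else 0

-- ===== PORT B =====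
-- Source B's slice tests s[i:i+k] == "…" become take-equalities on the suffix starting at i;
-- the i-loop over range(len(s)) becomes structural recursion over the suffixes (exact).
def pvMl (r : List Char) : Bool :=
  r.take 2 = ['m', 'l'] || r.take 3 = ['-', 'm', 'l']

def pvLt (r : List Char) : Bool :=
  r.take 2 = ['l', 't'] || r.take 3 = ['-', 'l', 't']

-- Source B's per-position decision tree on the suffix c :: rest (= s[i:]).
def pvBonusAt (c : Char) (rest : List Char) : Int :=
  if c = '5' then (if rest.take 2 = ['0', '0'] ∧ pvMl (rest.drop 2) then 7 else 0)
  else if c = '7' then (if rest.take 2 = ['5', '0'] ∧ pvMl (rest.drop 2) then 7 else 0)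
  else if c = '1' then
    (if pvLt rest then 7
     else if rest.take 3 = ['0', '0', '0'] ∧ pvMl (rest.drop 3) then 7 else 0)
  else if c = '2' then
    (if rest.take 2 = ['5', '0'] then 3
     else if pvLt rest then 2
     else if rest.take 3 = ['0', '0', '0'] then 2 else 0)
  else 0

def pvScan : List Char → Int → Int
  | [], best => best
  | c :: rest, best =>
      let b := pvBonusAt c rest
      pvScan rest (if b > best then b else best)

def volume_bonus_alt (name : String) : Int :=
  pvScan (PySem.Str.lower name).toList 0

-- ===== PRECONDITION & SPEC =====
def Spec_volume_bonus (name : String) (out : Int) : Prop := out = volume_bonus_alt name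
instance (name : String) (out : Int) : Decidable (Spec_volume_bonus name out) := by unfold Spec_volume_bonus; infer_instance

-- ===== CLAIM (what is proved, stated in full; the proofs are below) =====
def Claim_equal_volume_bonus : Prop := ∀ (name : String), Dom_volume_bonus name → Spec_volume_bonus name (volume_bonus name)

-- ===== LEMMAS AND PROOFS =====

-- A's three tiers as predicates on char lists: substring occurrence (infix) per tier …
abbrev pvA7 (l : List Char) : Prop :=
  ['5','0','0','-','m','l'] <:+: l ∨ ['5','0','0','m','l'] <:+: l ∨ ['7','5','0','m','l'] <:+: l ∨
  ['7','5','0','-','m','l'] <:+: l ∨ ['1','l','t'] <:+: l ∨ ['1','-','l','t'] <:+: l ∨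
  ['1','0','0','0','m','l'] <:+: l ∨ ['1','0','0','0','-','m','l'] <:+: l
abbrev pvA3 (l : List Char) : Prop :=
  ['2','5','0','m','l'] <:+: l ∨ ['2','5','0','-','m','l'] <:+: l ∨ ['2','5','0'] <:+: l
abbrev pvA2 (l : List Char) : Prop :=
  ['2','l','t'] <:+: l ∨ ['2','-','l','t'] <:+: l ∨ ['2','0','0','0'] <:+: l
-- … and occurrence at the head (prefix) per tier
abbrev pvP7 (l : List Char) : Prop :=
  ['5','0','0','-','m','l'] <+: l ∨ ['5','0','0','m','l'] <+: l ∨ ['7','5','0','m','l'] <+: l ∨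
  ['7','5','0','-','m','l'] <+: l ∨ ['1','l','t'] <+: l ∨ ['1','-','l','t'] <+: l ∨
  ['1','0','0','0','m','l'] <+: l ∨ ['1','0','0','0','-','m','l'] <+: l
abbrev pvP3 (l : List Char) : Prop :=
  ['2','5','0','m','l'] <+: l ∨ ['2','5','0','-','m','l'] <+: l ∨ ['2','5','0'] <+: l
abbrev pvP2 (l : List Char) : Prop :=
  ['2','l','t'] <+: l ∨ ['2','-','l','t'] <+: l ∨ ['2','0','0','0'] <+: l

def pvAval (l : List Char) : Int :=
  if pvA7 l then 7 else if pvA3 l then 3 else if pvA2 l then 2 else 0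
def pvPval (l : List Char) : Int :=
  if pvP7 l then 7 else if pvP3 l then 3 else if pvP2 l then 2 else 0

def pvM : List Char → Int
  | [] => 0
  | c :: r => max (pvBonusAt c r) (pvM r)

theorem pv_A_eq (s : String) : volume_bonus s = pvAval (PySem.Str.lower s).toList := by
  unfold volume_bonus pvAval
  simp only [List.any_cons, List.any_nil, Bool.or_eq_true,
    PySem.Str.isIn_iff_infix]
  simp only [Bool.false_eq_true, or_false]
  rfl

theorem pv_prefix_take (a r : List Char) : a <+: r ↔ r.take a.length = a := by
  rw [List.prefix_iff_eq_take]; exact eq_comm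

theorem pv_prefix_split (a b r : List Char) :
    a ++ b <+: r ↔ r.take a.length = a ∧ b <+: r.drop a.length := by
  constructor
  · intro h
    have ha : a <+: r := (List.prefix_append a b).trans h
    have hta : r.take a.length = a := (pv_prefix_take a r).mp ha
    refine ⟨hta, ?_⟩
    have hr : r = a ++ r.drop a.length := by
      conv_lhs => rw [← List.take_append_drop a.length r, hta]
    rw [hr] at h
    exact (List.prefix_append_right_inj a).mp h
  · rintro ⟨h1, h2⟩
    have hr : r = a ++ r.drop a.length := by
      conv_lhs => rw [← List.take_append_drop a.length r, h1]
    rw [hr]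
    exact (List.prefix_append_right_inj a).mpr h2

theorem pv_split2 (x y : Char) (b r : List Char) :
    (x :: y :: b) <+: r ↔ r.take 2 = [x, y] ∧ b <+: r.drop 2 := by
  simpa using pv_prefix_split [x, y] b r

theorem pv_split3 (x y z : Char) (b r : List Char) :
    (x :: y :: z :: b) <+: r ↔ r.take 3 = [x, y, z] ∧ b <+: r.drop 3 := by
  simpa using pv_prefix_split [x, y, z] b r

theorem pv_take2 (x y : Char) (r : List Char) : [x, y] <+: r ↔ r.take 2 = [x, y] := by
  simpa using pv_prefix_take [x, y] r

theorem pv_take3 (x y z : Char) (r : List Char) : [x, y, z] <+: r ↔ r.take 3 = [x, y, z] := by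
  simpa using pv_prefix_take [x, y, z] r

theorem lemA (r : List Char) :
    ['0','0','-','m','l'] <+: r ↔ r.take 2 = ['0','0'] ∧ (r.drop 2).take 3 = ['-','m','l'] := by
  rw [pv_split2, pv_take3]

theorem lemB (r : List Char) :
    ['0','0','m','l'] <+: r ↔ r.take 2 = ['0','0'] ∧ (r.drop 2).take 2 = ['m','l'] := by
  rw [pv_split2, pv_take2]

theorem lemC (r : List Char) :
    ['5','0','m','l'] <+: r ↔ r.take 2 = ['5','0'] ∧ (r.drop 2).take 2 = ['m','l'] := by
  rw [pv_split2, pv_take2]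

theorem lemD (r : List Char) :
    ['5','0','-','m','l'] <+: r ↔ r.take 2 = ['5','0'] ∧ (r.drop 2).take 3 = ['-','m','l'] := by
  rw [pv_split2, pv_take3]

theorem lemG (r : List Char) :
    ['0','0','0','m','l'] <+: r ↔ r.take 3 = ['0','0','0'] ∧ (r.drop 3).take 2 = ['m','l'] := by
  rw [pv_split3, pv_take2]

theorem lemH (r : List Char) :
    ['0','0','0','-','m','l'] <+: r ↔ r.take 3 = ['0','0','0'] ∧ (r.drop 3).take 3 = ['-','m','l'] := by
  rw [pv_split3, pv_take3]

theorem pv_bonusAt_eq (c : Char) (rest : List Char) :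
    pvBonusAt c rest = pvPval (c :: rest) := by
  unfold pvBonusAt pvPval pvMl pvLt
  by_cases h5 : c = '5'
  · subst h5
    simp [pvP7, pvP3, pvP2, List.cons_prefix_cons, lemA, lemB, lemC, lemD, lemG, lemH,
      pv_take2, pv_take3]
    split_ifs <;> tauto
  by_cases h7 : c = '7'
  · subst h7
    simp [pvP7, pvP3, pvP2, List.cons_prefix_cons, lemA, lemB, lemC, lemD, lemG, lemH,
      pv_take2, pv_take3]
    split_ifs <;> tauto
  by_cases h1 : c = '1'
  · subst h1
    simp [pvP7, pvP3, pvP2, List.cons_prefix_cons, lemA, lemB, lemC, lemD, lemG, lemH,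
      pv_take2, pv_take3]
    split_ifs <;> tauto
  by_cases h2 : c = '2'
  · subst h2
    simp [pvP7, pvP3, pvP2, List.cons_prefix_cons, lemA, lemB, lemC, lemD, lemG, lemH,
      pv_take2, pv_take3]
    split_ifs <;> tauto
  simp [pvP7, pvP3, pvP2, List.cons_prefix_cons, h5, h7, h1, h2,
    Ne.symm h5, Ne.symm h7, Ne.symm h1, Ne.symm h2]

theorem pv_tier (P7 P3 P2 A7 A3 A2 : Prop)
    [Decidable P7] [Decidable P3] [Decidable P2] [Decidable A7] [Decidable A3] [Decidable A2] :
    max (if P7 then (7 : Int) else if P3 then 3 else if P2 then 2 else 0)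
        (if A7 then 7 else if A3 then 3 else if A2 then 2 else 0)
    = if P7 ∨ A7 then 7 else if P3 ∨ A3 then 3 else if P2 ∨ A2 then 2 else 0 := by
  split_ifs <;> first | decide | tauto

theorem pvA7_cons (c : Char) (r : List Char) : pvA7 (c :: r) ↔ pvP7 (c :: r) ∨ pvA7 r := by
  unfold pvA7 pvP7; simp only [List.infix_cons_iff]; tauto

theorem pvA3_cons (c : Char) (r : List Char) : pvA3 (c :: r) ↔ pvP3 (c :: r) ∨ pvA3 r := by
  unfold pvA3 pvP3; simp only [List.infix_cons_iff]; tauto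

theorem pvA2_cons (c : Char) (r : List Char) : pvA2 (c :: r) ↔ pvP2 (c :: r) ∨ pvA2 r := by
  unfold pvA2 pvP2; simp only [List.infix_cons_iff]; tauto

theorem pv_M_eq (l : List Char) : pvM l = pvAval l := by
  induction l with
  | nil => simp only [pvM]; decide
  | cons c r ih =>
    simp only [pvM]
    rw [pv_bonusAt_eq, ih]
    unfold pvAval
    simp only [pvA7_cons, pvA3_cons, pvA2_cons]
    exact pv_tier _ _ _ _ _ _

theorem pv_bonusAt_nonneg (c : Char) (rest : List Char) : 0 ≤ pvBonusAt c rest := by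
  unfold pvBonusAt; split_ifs <;> norm_num

theorem pv_scan_eq (l : List Char) (best : Int) (h : 0 ≤ best) :
    pvScan l best = max best (pvM l) := by
  induction l generalizing best with
  | nil => simp [pvScan, pvM]; omega
  | cons c r ih =>
    have hb := pv_bonusAt_nonneg c r
    simp only [pvScan, pvM]
    rw [ih _ (by omega)]
    omega

-- ===== VERDICT (by name: the statement is the Claim_ definition above) =====
theorem volume_bonus_spec : Claim_equal_volume_bonus := by
  intro name _
  unfold Spec_volume_bonus volume_bonus_alt
  rw [pv_A_eq, pv_scan_eq _ _ le_rfl, ← pv_M_eq]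
  have : 0 ≤ pvM (PySem.Str.lower name).toList := by
    rw [pv_M_eq, pvAval]; split_ifs <;> norm_num
  omega
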